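-- pv_equiv track=rewrite | github.com/marivsteo/Artificial-Intelligence | lab03/lab3/ParticleSwarmUseless/Domain.py | fitnesses
-- ===== SOURCE A (Python) =====
-- def fitnesses(individual):
--     count1 = 0
--     count2 = 0
--     count3 = 0
--
--     for j in range(len(individual) // 2):
--         visited = []
--         for i in range(len(individual) // 2):
--             if individual[i][j] in visited:
--                 count1 += 1
--             visited.append(individual[i][j])
--
--     for j in range(len(individual) // 2):
--         visited = []
--         for i in range(len(individual) // 2, len(individual)):
--             if individual[i][j] in visited:
--                 count2 += 1
--             visited.append(individual[i][j])
--
--     pairs = []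
--     for j in range(len(individual) // 2):
--         for i in range(len(individual) // 2):
--             pairs.append((individual[i][j], individual[i + len(individual) // 2][j]))
--
--     count3 = (len(individual) // 2 * len(individual) // 2 * -1)
--     for pair1 in pairs:
--         for pair2 in pairs:
--             if pair1 == pair2:
--                 count3 += 1
--
--     return count1 + count2 + count3
-- ===== SOURCE B (Python) =====
-- def fitnesses(individual):
--     # One-pass hash counting: per-column counters replace A's visited-list
--     # membership scans, and a global pair counter (sum of f*f) replaces A's
--     # all-pairs double loop; the baseline `h * n // 2` is A's exact offset.
--     n = len(individual)
--     h = n // 2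
--     total = 0
--     pc = {}
--     for j in range(h):
--         topc = {}
--         botc = {}
--         for i in range(h):
--             t = individual[i][j]
--             topc[t] = topc.get(t, 0) + 1
--             p = (t, individual[i + h][j])
--             pc[p] = pc.get(p, 0) + 1
--         for i in range(h, n):
--             b = individual[i][j]
--             botc[b] = botc.get(b, 0) + 1
--         total += sum(c - 1 for c in topc.values())
--         total += sum(c - 1 for c in botc.values())
--     total += sum(c * c for c in pc.values())
--     return total - h * n // 2
-- ===== Notes on version B (the rewrite author's own statement) =====
-- stated objective: faster
-- what changed: Replaces A's visited-list membership scans and the all-pairs pair-matching double loop with one pass of hash-map counting (per-column duplicate counters and a global pair-frequency counter summed as f*f).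
import Mathlib
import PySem

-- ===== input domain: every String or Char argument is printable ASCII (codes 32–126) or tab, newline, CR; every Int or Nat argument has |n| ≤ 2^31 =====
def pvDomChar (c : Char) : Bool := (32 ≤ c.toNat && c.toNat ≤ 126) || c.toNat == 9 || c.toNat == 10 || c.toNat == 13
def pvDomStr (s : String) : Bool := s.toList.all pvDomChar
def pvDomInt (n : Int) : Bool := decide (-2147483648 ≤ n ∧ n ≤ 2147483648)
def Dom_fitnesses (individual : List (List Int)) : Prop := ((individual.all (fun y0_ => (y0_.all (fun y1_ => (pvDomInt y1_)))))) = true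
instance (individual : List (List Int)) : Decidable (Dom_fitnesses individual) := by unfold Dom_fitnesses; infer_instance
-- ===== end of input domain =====

-- B replaces A's visited-list membership scans and all-pairs pair matching by one
-- hash-counting pass (per-column counters; global pair counter summed as f*f).


-- ===== PORT A =====
def fitnesses (individual : List (List Int)) : Int :=
  let n := PySem.List.len individual
  let h := PySem.Int.floordiv n 2
  let count1 : Int :=
    (PySem.List.pyRange 0 h 1).foldl (fun count1 j =>
      ((PySem.List.pyRange 0 h 1).foldl
        (fun (st : Int × List Int) i =>
          (st.1 + (if PySem.List.pyGetD (PySem.List.pyGetD individual i []) j 0 ∈ st.2 then 1 else 0),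
           st.2 ++ [PySem.List.pyGetD (PySem.List.pyGetD individual i []) j 0]))
        (count1, [])).1) 0
  let count2 : Int :=
    (PySem.List.pyRange 0 h 1).foldl (fun count2 j =>
      ((PySem.List.pyRange h n 1).foldl
        (fun (st : Int × List Int) i =>
          (st.1 + (if PySem.List.pyGetD (PySem.List.pyGetD individual i []) j 0 ∈ st.2 then 1 else 0),
           st.2 ++ [PySem.List.pyGetD (PySem.List.pyGetD individual i []) j 0]))
        (count2, [])).1) 0
  let pairs : List (Int × Int) :=
    (PySem.List.pyRange 0 h 1).foldl (fun pairs j =>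
      (PySem.List.pyRange 0 h 1).foldl
        (fun pairs i =>
          pairs ++ [(PySem.List.pyGetD (PySem.List.pyGetD individual i []) j 0,
                     PySem.List.pyGetD (PySem.List.pyGetD individual (i + h) []) j 0)])
        pairs) []
  let count3 : Int := PySem.Int.floordiv (h * n) 2 * -1
  let count3 := pairs.foldl (fun count3 pair1 =>
      pairs.foldl (fun count3 pair2 => count3 + if pair1 = pair2 then 1 else 0) count3) count3
  count1 + count2 + count3

-- ===== PORT B =====
def fitnesses_alt (individual : List (List Int)) : Int :=
  let n := PySem.List.len individual
  let h := PySem.Int.floordiv n 2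
  let res :=
    (PySem.List.pyRange 0 h 1).foldl
      (fun (st : Int × PySem.Dict (Int × Int) Int) j =>
        let inner :=
          (PySem.List.pyRange 0 h 1).foldl
            (fun (q : PySem.Dict Int Int × PySem.Dict (Int × Int) Int) i =>
              (q.1.insert (PySem.List.pyGetD (PySem.List.pyGetD individual i []) j 0)
                 (q.1.getD (PySem.List.pyGetD (PySem.List.pyGetD individual i []) j 0) 0 + 1),
               q.2.insert (PySem.List.pyGetD (PySem.List.pyGetD individual i []) j 0,
                           PySem.List.pyGetD (PySem.List.pyGetD individual (i + h) []) j 0)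
                 (q.2.getD (PySem.List.pyGetD (PySem.List.pyGetD individual i []) j 0,
                            PySem.List.pyGetD (PySem.List.pyGetD individual (i + h) []) j 0) 0 + 1)))
            (PySem.Dict.empty, st.2)
        let botc :=
          (PySem.List.pyRange h n 1).foldl
            (fun (botc : PySem.Dict Int Int) i =>
              botc.insert (PySem.List.pyGetD (PySem.List.pyGetD individual i []) j 0)
                (botc.getD (PySem.List.pyGetD (PySem.List.pyGetD individual i []) j 0) 0 + 1))
            PySem.Dict.empty
        (st.1 + (inner.1.values.map (fun c => c - 1)).sum
              + (botc.values.map (fun c => c - 1)).sum,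
         inner.2))
      (0, PySem.Dict.empty)
  res.1 + (res.2.values.map (fun c => c * c)).sum - PySem.Int.floordiv (h * n) 2

-- ===== PRECONDITION & SPEC =====
-- Pre_ excludes exactly the inputs where Python A raises IndexError: some row
-- shorter than len(individual)//2 (every row is indexed at all columns j < len//2).
def Pre_fitnesses (individual : List (List Int)) : Prop :=
  ∀ row ∈ individual, individual.length / 2 ≤ row.length
instance (individual : List (List Int)) : Decidable (Pre_fitnesses individual) := by
  unfold Pre_fitnesses; infer_instance
def pvWitness_fitnesses : List (List Int) := [[1, 2], [1, 3], [2, 2], [1, 3]]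
def Spec_fitnesses (individual : List (List Int)) (out : Int) : Prop := out = fitnesses_alt individual
instance (individual : List (List Int)) (out : Int) : Decidable (Spec_fitnesses individual out) := by
  unfold Spec_fitnesses; infer_instance

-- ===== CLAIM (what is proved, stated in full; the proofs are below) =====
def Claim_equal_fitnesses : Prop := ∀ (individual : List (List Int)), Dom_fitnesses individual → Pre_fitnesses individual → Spec_fitnesses individual (fitnesses individual)

-- ===== LEMMAS AND PROOFS =====

-- the cell value individual[i][j] (both ports read it through total defaults)
def pvG (ind : List (List Int)) (i j : Nat) : Int := (ind.getD i []).getD j 0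
-- top-half column j, bottom-half column j, vertical pairs of column j, all pairs
def pvTcol (ind : List (List Int)) (j : Nat) : List Int :=
  (List.range (ind.length / 2)).map (fun i => pvG ind i j)
def pvBcol (ind : List (List Int)) (j : Nat) : List Int :=
  (List.range (ind.length - ind.length / 2)).map (fun i => pvG ind (ind.length / 2 + i) j)
def pvPcol (ind : List (List Int)) (j : Nat) : List (Int × Int) :=
  (List.range (ind.length / 2)).map (fun i => (pvG ind i j, pvG ind (i + ind.length / 2) j))
def pvP (ind : List (List Int)) : List (Int × Int) :=
  (List.range (ind.length / 2)).flatMap (fun j => pvPcol ind j)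
-- number of duplicate entries of a list (entries minus distinct entries)
def pvDup (l : List Int) : Int := (l.length : Int) - (l.toFinset.card : Int)
-- the common closed form both ports are reduced to
def pvCanon (ind : List (List Int)) : Int :=
  ((List.range (ind.length / 2)).map (fun j => pvDup (pvTcol ind j))).sum
  + ((List.range (ind.length / 2)).map (fun j => pvDup (pvBcol ind j))).sum
  + ((pvP ind).map (fun p => ((pvP ind).count p : Int))).sum
  - ((ind.length / 2 * ind.length / 2 : Nat) : Int)

lemma pv_dupfold (l : List Int) (c : Int) (v : List Int) :
    (l.foldl (fun (st : Int × List Int) x =>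
        (st.1 + (if x ∈ st.2 then 1 else 0), st.2 ++ [x])) (c, v)).1
      = c + (l.length : Int) - ((l.toFinset \ v.toFinset).card : Int) := by
  induction l generalizing c v with
  | nil => simp
  | cons x l ih =>
    simp only [List.foldl_cons]
    rw [ih]
    have hins : (v ++ [x]).toFinset = insert x v.toFinset := by
      ext a; simp
    rw [hins]
    by_cases hx : x ∈ v
    · have hxt : x ∈ v.toFinset := List.mem_toFinset.mpr hx
      rw [Finset.insert_eq_self.mpr hxt]
      rw [List.toFinset_cons, Finset.insert_sdiff_of_mem _ hxt]
      simp [hx]; ring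
    · have hxt : x ∉ v.toFinset := fun h => hx (List.mem_toFinset.mp h)
      have hset : (x :: l).toFinset \ v.toFinset = insert x (l.toFinset \ insert x v.toFinset) := by
        ext a; by_cases ha : a = x <;> simp [ha, hxt]
      have hcard : ((x :: l).toFinset \ v.toFinset).card
          = (l.toFinset \ insert x v.toFinset).card + 1 := by
        rw [hset, Finset.card_insert_of_notMem (by simp)]
      rw [hcard]
      simp [hx]; ring

-- count with the Prod-BEq instance (as in the ports' pair dicts) is count with
-- the DecidableEq-derived instance (as produced by Finset.sum_list_map_count)
lemma pv_count_prod (m : Int × Int) (P : List (Int × Int)) :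
    @List.count (Int × Int) (@instBEqOfDecidableEq (Int × Int) instDecidableEqProd) m P
      = @List.count (Int × Int) instBEqProd m P := by
  simp only [List.count_eq_countP]
  apply List.countP_congr
  intro a _
  simp

-- extending a counter dict by a further block of keys
lemma pv_counter_foldl {k : Type} [BEq k] (ys xs : List k) :
    xs.foldl (fun (d : PySem.Dict k Int) x => d.insert x (d.getD x 0 + 1))
        (PySem.Dict.counter ys)
      = PySem.Dict.counter (ys ++ xs) := by
  rw [← PySem.Dict.foldl_insert_getD_add_one_eq_counter ys,
      ← PySem.Dict.foldl_insert_getD_add_one_eq_counter (ys ++ xs), List.foldl_append]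

-- the same, for a loop that inserts key i rather than iterating over the keys
lemma pv_counter_keyfold {a k : Type} [BEq k] (key : a → k) (js : List a) (ys : List k) :
    js.foldl (fun (d : PySem.Dict k Int) i => d.insert (key i) (d.getD (key i) 0 + 1))
        (PySem.Dict.counter ys)
      = PySem.Dict.counter (ys ++ js.map key) := by
  have h := pv_counter_foldl ys (js.map key)
  simp only [List.foldl_map] at h
  exact h

-- B's outer loop threads the pair counter through all columns
lemma pv_counter_outer (pk : Nat → Nat → (Int × Int)) (m : Nat) (js : List Nat)
    (ys : List (Int × Int)) :
    js.foldl (fun (d : PySem.Dict (Int × Int) Int) j =>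
        (List.range m).foldl
          (fun (d : PySem.Dict (Int × Int) Int) i => d.insert (pk j i) (d.getD (pk j i) 0 + 1)) d)
        (PySem.Dict.counter ys)
      = PySem.Dict.counter (ys ++ js.flatMap (fun j => (List.range m).map (pk j))) := by
  induction js generalizing ys with
  | nil => simp
  | cons j js ih =>
    simp only [List.foldl_cons, List.flatMap_cons]
    rw [pv_counter_keyfold (pk j) (List.range m) ys, ih, List.append_assoc]

lemma pv_toFinset_ofList (l : List Int) : (PySem.Set.ofList l).toFinset = l.toFinset := by
  ext a; simp [List.mem_toFinset, PySem.Set.mem_ofList]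

lemma pv_toFinset_ofList_p (l : List (Int × Int)) : (PySem.Set.ofList l).toFinset = l.toFinset := by
  ext a; simp [List.mem_toFinset, PySem.Set.mem_ofList]

-- B's per-column duplicate count: sum of (multiplicity - 1) over a counter
lemma pv_sum_sub_one (xs : List Int) :
    (((PySem.Dict.counter xs).values).map (fun c => c - 1)).sum
      = (xs.length : Int) - (xs.toFinset.card : Int) := by
  simp only [PySem.Dict.values, PySem.Dict.items_counter, List.map_map]
  have hnd := PySem.Set.nodup_ofList (xs := xs)
  have h1 : (List.map ((fun c => c - 1) ∘ Prod.snd ∘ fun k => (k, (xs.count k : Int)))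
      (PySem.Set.ofList xs)).sum
      = ∑ a ∈ (PySem.Set.ofList xs).toFinset, ((xs.count a : Int) - 1) := by
    rw [List.sum_toFinset _ hnd]; rfl
  rw [h1, pv_toFinset_ofList, Finset.sum_sub_distrib]
  simp
  push_cast [← List.sum_toFinset_count_eq_length xs]
  rfl

-- B's pair score: sum of multiplicity^2 over the pair counter is A's
-- sum of multiplicities over the pair list itself
lemma pv_sum_sq (P : List (Int × Int)) :
    (((PySem.Dict.counter P).values).map (fun c => c * c)).sum
      = (P.map (fun p => ((P.count p : Int)))).sum := by
  simp only [PySem.Dict.values, PySem.Dict.items_counter, List.map_map]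
  have hnd := PySem.Set.nodup_ofList (xs := P)
  have h1 : (List.map ((fun c => c * c) ∘ Prod.snd ∘ fun k => (k, (P.count k : Int)))
      (PySem.Set.ofList P)).sum
      = ∑ a ∈ (PySem.Set.ofList P).toFinset, ((P.count a : Int) * (P.count a : Int)) := by
    rw [List.sum_toFinset _ hnd]; rfl
  rw [h1, pv_toFinset_ofList_p, Finset.sum_list_map_count]
  refine Finset.sum_congr rfl (fun m _ => ?_)
  rw [nsmul_eq_mul]
  norm_num
  exact Or.inl (pv_count_prod m P).symm

-- A's visited-list loop over keyed indices counts entries minus distinct entries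
lemma pv_duploop {a : Type} (key : a → Int) (js : List a) (c : Int) (v : List Int) :
    (js.foldl (fun (st : Int × List Int) i =>
        (st.1 + (if key i ∈ st.2 then 1 else 0), st.2 ++ [key i])) (c, v)).1
      = c + (js.length : Int) - (((js.map key).toFinset \ v.toFinset).card : Int) := by
  have h := pv_dupfold (js.map key) c v
  simp only [List.foldl_map] at h
  rw [h, List.length_map]

-- 0/1-sum over Prop-equality tests is a count
lemma pv_sum_ite_count (p : Int × Int) (P : List (Int × Int)) :
    (P.map (fun q => if p = q then (1 : Int) else 0)).sum = ((P.count p : Nat) : Int) := by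
  rw [List.count_eq_countP, ← PySem.List.sum_map_ite_one_zero (fun q => q == p) P]
  have hf : (fun q => if p = q then (1 : Int) else 0)
      = (fun q => if (q == p) = true then (1 : Int) else 0) := by
    funext q
    by_cases h : p = q
    · subst h; simp
    · have hb : (q == p) = false := by
        simp only [beq_eq_false_iff_ne]
        exact fun e => h e.symm
      simp [h, hb]
  rw [hf]

lemma pv_A_eq (ind : List (List Int)) : fitnesses ind = pvCanon ind := by
  have hfd : PySem.Int.floordiv (ind.length : Int) 2 = ((ind.length / 2 : Nat) : Int) := by
    exact_mod_cast PySem.Int.floordiv_natCast ind.length 2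
  have hr1 : PySem.List.pyRange ((ind.length / 2 : Nat) : Int) (ind.length : Int) 1
      = (List.range (ind.length - ind.length / 2)).map (fun k => ((ind.length / 2 + k : Nat) : Int)) := by
    rw [PySem.List.pyRange_one]
    have : ((ind.length : Int) - ((ind.length / 2 : Nat) : Int)).toNat = ind.length - ind.length / 2 := by
      omega
    rw [this]
    refine List.map_congr_left (fun k _ => ?_)
    push_cast
    ring
  have hoff : PySem.Int.floordiv (((ind.length / 2 : Nat) : Int) * (ind.length : Int)) 2
      = ((ind.length / 2 * ind.length / 2 : Nat) : Int) := by
    rw [← Nat.cast_mul]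
    exact_mod_cast PySem.Int.floordiv_natCast (ind.length / 2 * ind.length) 2
  simp only [fitnesses, PySem.List.len_eq, hfd, hoff, hr1, PySem.List.pyRange_zero_nat,
    List.foldl_map, ← Nat.cast_add, PySem.List.pyGetD_natCast]
  simp only [PySem.List.foldl_append_singleton_eq_map, PySem.List.foldl_append_eq_flatMap,
    List.nil_append, pv_duploop, List.toFinset_nil, Finset.sdiff_empty, List.length_range]
  simp only [add_sub_assoc, PySem.List.foldl_add, pv_sum_ite_count]
  simp only [pvCanon, pvP, pvPcol, pvTcol, pvBcol, pvDup, pvG, List.length_map, List.length_range]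
  push_cast
  ring

lemma pv_B_eq (ind : List (List Int)) : fitnesses_alt ind = pvCanon ind := by
  have hfd : PySem.Int.floordiv (ind.length : Int) 2 = ((ind.length / 2 : Nat) : Int) := by
    exact_mod_cast PySem.Int.floordiv_natCast ind.length 2
  have hr1 : PySem.List.pyRange ((ind.length / 2 : Nat) : Int) (ind.length : Int) 1
      = (List.range (ind.length - ind.length / 2)).map (fun k => ((ind.length / 2 + k : Nat) : Int)) := by
    rw [PySem.List.pyRange_one]
    have : ((ind.length : Int) - ((ind.length / 2 : Nat) : Int)).toNat = ind.length - ind.length / 2 := by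
      omega
    rw [this]
    refine List.map_congr_left (fun k _ => ?_)
    push_cast
    ring
  have hoff : PySem.Int.floordiv (((ind.length / 2 : Nat) : Int) * (ind.length : Int)) 2
      = ((ind.length / 2 * ind.length / 2 : Nat) : Int) := by
    rw [← Nat.cast_mul]
    exact_mod_cast PySem.Int.floordiv_natCast (ind.length / 2 * ind.length) 2
  simp only [fitnesses_alt, PySem.List.len_eq, hfd, hoff, hr1, PySem.List.pyRange_zero_nat,
    List.foldl_map, ← Nat.cast_add, PySem.List.pyGetD_natCast]
  have hempty2 : (PySem.Dict.empty : PySem.Dict (Int × Int) Int) = PySem.Dict.counter [] := rfl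
  have hempty1 : (PySem.Dict.empty : PySem.Dict Int Int) = PySem.Dict.counter ([] : List Int) := rfl
  have hcong :
      List.foldl
        (fun (x : Int × PySem.Dict (Int × Int) Int) (y : Nat) =>
          (x.1 +
              (List.map (fun c => c - 1)
                  (List.foldl
                        (fun (x : PySem.Dict Int Int × PySem.Dict (Int × Int) Int) (y_1 : Nat) =>
                          (x.1.insert ((ind.getD y_1 []).getD y 0) (x.1.getD ((ind.getD y_1 []).getD y 0) 0 + 1),
                            x.2.insert ((ind.getD y_1 []).getD y 0, (ind.getD (y_1 + ind.length / 2) []).getD y 0)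
                              (x.2.getD
                                  ((ind.getD y_1 []).getD y 0, (ind.getD (y_1 + ind.length / 2) []).getD y 0) 0 +
                                1)))
                        (PySem.Dict.empty, x.2) (List.range (ind.length / 2))).1.values).sum +
            (List.map (fun c => c - 1)
                (List.foldl
                    (fun (x : PySem.Dict Int Int) (y_1 : Nat) =>
                      x.insert ((ind.getD (ind.length / 2 + y_1) []).getD y 0)
                        (x.getD ((ind.getD (ind.length / 2 + y_1) []).getD y 0) 0 + 1))
                    PySem.Dict.empty (List.range (ind.length - ind.length / 2))).values).sum,
            (List.foldl
                (fun (x : PySem.Dict Int Int × PySem.Dict (Int × Int) Int) (y_1 : Nat) =>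
                  (x.1.insert ((ind.getD y_1 []).getD y 0) (x.1.getD ((ind.getD y_1 []).getD y 0) 0 + 1),
                    x.2.insert ((ind.getD y_1 []).getD y 0, (ind.getD (y_1 + ind.length / 2) []).getD y 0)
                      (x.2.getD ((ind.getD y_1 []).getD y 0, (ind.getD (y_1 + ind.length / 2) []).getD y 0) 0 + 1)))
                (PySem.Dict.empty, x.2) (List.range (ind.length / 2))).2))
        (0, PySem.Dict.empty) (List.range (ind.length / 2))
      = List.foldl
        (fun (x : Int × PySem.Dict (Int × Int) Int) (y : Nat) =>
          (x.1 +
              (List.map (fun c => c - 1)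
                  (List.foldl
                        (fun (d : PySem.Dict Int Int) (y_1 : Nat) =>
                          d.insert ((ind.getD y_1 []).getD y 0) (d.getD ((ind.getD y_1 []).getD y 0) 0 + 1))
                        PySem.Dict.empty (List.range (ind.length / 2))).values).sum +
            (List.map (fun c => c - 1)
                (List.foldl
                    (fun (x : PySem.Dict Int Int) (y_1 : Nat) =>
                      x.insert ((ind.getD (ind.length / 2 + y_1) []).getD y 0)
                        (x.getD ((ind.getD (ind.length / 2 + y_1) []).getD y 0) 0 + 1))
                    PySem.Dict.empty (List.range (ind.length - ind.length / 2))).values).sum,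
            List.foldl
                (fun (d : PySem.Dict (Int × Int) Int) (y_1 : Nat) =>
                  d.insert ((ind.getD y_1 []).getD y 0, (ind.getD (y_1 + ind.length / 2) []).getD y 0)
                    (d.getD ((ind.getD y_1 []).getD y 0, (ind.getD (y_1 + ind.length / 2) []).getD y 0) 0 + 1))
                x.2 (List.range (ind.length / 2))))
        (0, PySem.Dict.empty) (List.range (ind.length / 2)) := by
    refine PySem.List.foldl_congr_mem _ _ _ _ (fun st j _ => ?_)
    rw [PySem.List.foldl_prod_mk
      (fun (d : PySem.Dict Int Int) (i : Nat) =>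
        d.insert ((ind.getD i []).getD j 0) (d.getD ((ind.getD i []).getD j 0) 0 + 1))
      (fun (d : PySem.Dict (Int × Int) Int) (i : Nat) =>
        d.insert ((ind.getD i []).getD j 0, (ind.getD (i + ind.length / 2) []).getD j 0)
          (d.getD ((ind.getD i []).getD j 0, (ind.getD (i + ind.length / 2) []).getD j 0) 0 + 1))
      (List.range (ind.length / 2)) PySem.Dict.empty st.2]
  rw [hcong]
  rw [PySem.List.foldl_prod_mk
    (fun (t : Int) (y : Nat) =>
      t +
          (List.map (fun c => c - 1)
              (List.foldl
                    (fun (d : PySem.Dict Int Int) (y_1 : Nat) =>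
                      d.insert ((ind.getD y_1 []).getD y 0) (d.getD ((ind.getD y_1 []).getD y 0) 0 + 1))
                    PySem.Dict.empty (List.range (ind.length / 2))).values).sum +
        (List.map (fun c => c - 1)
            (List.foldl
                (fun (x : PySem.Dict Int Int) (y_1 : Nat) =>
                  x.insert ((ind.getD (ind.length / 2 + y_1) []).getD y 0)
                    (x.getD ((ind.getD (ind.length / 2 + y_1) []).getD y 0) 0 + 1))
                PySem.Dict.empty (List.range (ind.length - ind.length / 2))).values).sum)
    (fun (d : PySem.Dict (Int × Int) Int) (y : Nat) =>
      List.foldl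
        (fun (d : PySem.Dict (Int × Int) Int) (y_1 : Nat) =>
          d.insert ((ind.getD y_1 []).getD y 0, (ind.getD (y_1 + ind.length / 2) []).getD y 0)
            (d.getD ((ind.getD y_1 []).getD y 0, (ind.getD (y_1 + ind.length / 2) []).getD y 0) 0 + 1))
        d (List.range (ind.length / 2)))
    (List.range (ind.length / 2)) 0 PySem.Dict.empty]
  simp only []
  rw [hempty2,
    pv_counter_outer
      (fun (j i : Nat) => ((ind.getD i []).getD j 0, (ind.getD (i + ind.length / 2) []).getD j 0))
      (ind.length / 2) (List.range (ind.length / 2)) []]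
  simp only [hempty1, pv_counter_keyfold, List.nil_append, pv_sum_sub_one, pv_sum_sq]
  simp only [add_assoc, PySem.List.foldl_add]
  simp only [pvCanon, pvP, pvPcol, pvTcol, pvBcol, pvDup, pvG, List.length_map, List.length_range]
  simp only [add_sub_assoc, PySem.List.sum_map_add_int]
  push_cast
  ring


-- ===== VERDICT (by name: the statement is the Claim_ definition above) =====
theorem fitnesses_spec : Claim_equal_fitnesses := by
  intro ind _ _
  unfold Spec_fitnesses
  rw [pv_A_eq, pv_B_eq]
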